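-- pv_equiv track=rewrite | github.com/julianchatto/Lehigh_CSE | CSE262/p3/src/python/slang_scanner_xml.py | xml_unescape
-- ===== SOURCE A (Python) =====
-- def xml_unescape(s):
--     """Remove escape characters from a string when reading from XML"""
--     ans = ""
--     in_escape = False
--     for i in s:
--         if not in_escape:
--             if i != "\\":
--                 ans += i
--             else:
--                 in_escape = True
--         else:
--             if i == "\\":
--                 ans += "\\"
--                 in_escape = False
--             elif i == "t":
--                 ans += "\t"
--                 in_escape = False
--             elif i == "n":
--                 ans += "\n"
--                 in_escape = False
--             elif i == "'":
--                 ans += "'"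
--                 in_escape = False
--             if in_escape:
--                 raise RuntimeError("Invalid string?!?")
--     return ans
-- ===== SOURCE B (Python) =====
-- def xml_unescape(s):
--     """Remove escape characters from a string when reading from XML"""
--     esc = {"\\": "\\", "t": "\t", "n": "\n", "'": "'"}
--     parts = []
--     i = 0
--     n = len(s)
--     while i < n:
--         c = s[i]
--         if c != "\\":
--             parts.append(c)
--             i += 1
--         elif i + 1 >= n:
--             # trailing lone backslash: consumed with no output (as A does)
--             i += 1
--         else:
--             m = esc.get(s[i + 1])
--             if m is None:
--                 raise RuntimeError("Invalid string?!?")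
--             parts.append(m)
--             i += 2
--     return "".join(parts)
-- ===== Notes on version B (the rewrite author's own statement) =====
-- stated objective: idiomatic
-- what changed: Replaces the per-character in_escape state machine with an index-based lookahead loop over a dict of escape mappings, collecting output parts and joining once.
import Mathlib
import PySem

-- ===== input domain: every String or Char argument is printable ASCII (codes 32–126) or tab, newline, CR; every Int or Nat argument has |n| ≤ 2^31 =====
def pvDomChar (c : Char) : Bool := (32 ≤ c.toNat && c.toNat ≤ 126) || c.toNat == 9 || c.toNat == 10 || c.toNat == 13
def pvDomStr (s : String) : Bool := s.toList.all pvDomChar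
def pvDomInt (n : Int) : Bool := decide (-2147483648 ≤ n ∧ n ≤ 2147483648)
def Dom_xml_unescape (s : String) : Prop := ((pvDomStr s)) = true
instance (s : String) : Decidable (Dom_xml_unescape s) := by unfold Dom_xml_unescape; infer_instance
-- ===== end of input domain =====

-- B rewrites A's per-character in_escape state machine as an index-based lookahead
-- loop over a dict of escape mappings (objective: idiomatic).

-- ===== PORT A =====
-- A's for-loop body: state = some (ans, in_escape); `none` marks the raise
-- RuntimeError (outside Pre_).
def xmlStepA (st : Option (List Char × Bool)) (i : Char) : Option (List Char × Bool) :=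
  match st with
  | none => none
  | some (ans, inEsc) =>
    if !inEsc then
      if i ≠ '\\' then some (ans ++ [i], false)
      else some (ans, true)
    else
      let p : List Char × Bool :=
        if i = '\\' then (ans ++ ['\\'], false)
        else if i = 't' then (ans ++ ['\t'], false)
        else if i = 'n' then (ans ++ ['\n'], false)
        else if i = '\'' then (ans ++ ['\''], false)
        else (ans, inEsc)
      if p.2 then none else some p

def xml_unescape (s : String) : String :=
  match s.toList.foldl xmlStepA (some ([], false)) with
  | some (ans, _) => String.ofList ans
  | none => ""   -- A raises here; excluded by Pre_

-- ===== PORT B =====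
-- B's escape dict {'\\':'\\','t':'\t','n':'\n',"'":"'"}.
def xmlEscDict : PySem.Dict Char Char :=
  PySem.Dict.ofList [('\\', '\\'), ('t', '\t'), ('n', '\n'), ('\'', '\'')]

-- B's while loop over the index: consume one plain char, or a backslash plus
-- its lookahead; `none` marks B's raise (same invalid-escape inputs).
def xmlGoB : List Char → Option (List Char)
  | [] => some []
  | c :: rest =>
    if c ≠ '\\' then (xmlGoB rest).map (fun r => c :: r)
    else
      match rest with
      | [] => some []   -- trailing lone backslash: advance past it, no output
      | d :: rest' =>
        match PySem.Dict.get? xmlEscDict d with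
        | some m => (xmlGoB rest').map (fun r => m :: r)
        | none => none

def xml_unescape_alt (s : String) : String :=
  match xmlGoB s.toList with
  | some l => String.ofList l
  | none => ""

-- ===== PRECONDITION & SPEC =====
-- Number of consecutive backslashes at the end of a list.
def trailBS (l : List Char) : Nat := (l.reverse.takeWhile (· == '\\')).length

-- Pre_ excludes exactly the inputs on which A raises RuntimeError:
-- any character preceded by an odd run of backslashes (i.e. in escape position) must be
-- one of \\ t n '; a trailing lone backslash is fine (A silently drops it).
def Pre_xml_unescape (s : String) : Prop :=
  ∀ j, (hj : j < s.toList.length) → trailBS (s.toList.take j) % 2 = 1 →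
    (s.toList[j] = '\\' ∨ s.toList[j] = 't' ∨ s.toList[j] = 'n' ∨ s.toList[j] = '\'')
instance (s : String) : Decidable (Pre_xml_unescape s) := by unfold Pre_xml_unescape; infer_instance

def pvWitness_xml_unescape : String := "a\\nb"

def Spec_xml_unescape (s : String) (out : String) : Prop := out = xml_unescape_alt s
instance (s : String) (out : String) : Decidable (Spec_xml_unescape s out) := by unfold Spec_xml_unescape; infer_instance

-- ===== CLAIM (what is proved, stated in full; the proofs are below) =====
def Claim_equal_xml_unescape : Prop := ∀ (s : String), Dom_xml_unescape s → Pre_xml_unescape s → Spec_xml_unescape s (xml_unescape s)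

-- ===== LEMMAS AND PROOFS =====
-- trailBS toolkit
lemma trail_all (t : List Char) (h : ∀ x ∈ t, x = '\\') : trailBS t = t.length := by
  unfold trailBS
  rw [List.takeWhile_eq_self_iff.mpr (by simpa using fun x hx => h x (List.mem_reverse.mp hx))]
  simp

lemma trail_le (t : List Char) : trailBS t ≤ t.length := by
  unfold trailBS
  calc (List.takeWhile (· == '\\') t.reverse).length ≤ t.reverse.length := (List.takeWhile_prefix _).length_le
    _ = t.length := List.length_reverse

lemma trail_not_all (t : List Char) (h : ¬ ∀ x ∈ t, x = '\\') : trailBS t < t.length := by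
  rcases Nat.lt_or_ge (trailBS t) t.length with hlt | hge
  · exact hlt
  · exfalso
    have heq : trailBS t = t.length := le_antisymm (trail_le t) hge
    unfold trailBS at heq
    rw [show t.length = t.reverse.length from (List.length_reverse).symm] at heq
    have := List.takeWhile_eq_self_iff.mp (List.IsPrefix.eq_of_length (List.takeWhile_prefix _) heq)
    exact h fun x hx => by simpa using this x (List.mem_reverse.mpr hx)

lemma trail_cons (c : Char) (t : List Char) :
    trailBS (c :: t) = if ∀ x ∈ t, x = '\\' then (if c = '\\' then t.length + 1 else t.length) else trailBS t := by
  unfold trailBS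
  rw [List.reverse_cons, List.takeWhile_append]
  by_cases hall : ∀ x ∈ t, x = '\\'
  · rw [if_pos hall]
    have h1 : List.takeWhile (fun x => x == '\\') t.reverse = t.reverse :=
      List.takeWhile_eq_self_iff.mpr (by simpa using fun x hx => hall x (List.mem_reverse.mp hx))
    rw [h1]
    simp only [List.length_reverse]
    by_cases hc : c = '\\' <;> simp [hc]
  · rw [if_neg hall]
    have h2 : (List.takeWhile (fun x => x == '\\') t.reverse).length ≠ t.reverse.length := by
      rw [List.length_reverse]
      exact Nat.ne_of_lt (by simpa [trailBS] using trail_not_all t hall)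
    rw [if_neg h2]

lemma trail_cons_ne (c : Char) (t : List Char) (hc : c ≠ '\\') : trailBS (c :: t) = trailBS t := by
  rw [trail_cons]
  by_cases hall : ∀ x ∈ t, x = '\\'
  · rw [if_pos hall, if_neg hc, trail_all t hall]
  · rw [if_neg hall]

lemma trail_two (d : Char) (t : List Char) : trailBS ('\\' :: d :: t) % 2 = trailBS t % 2 := by
  rw [trail_cons]
  by_cases hAll : ∀ x ∈ (d :: t), x = '\\'
  · rw [if_pos hAll]
    have hd : d = '\\' := hAll d List.mem_cons_self
    have ht : ∀ x ∈ t, x = '\\' := fun x hx => hAll x (List.mem_cons_of_mem d hx)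
    rw [trail_all t ht]
    simp
    omega
  · rw [if_neg hAll, trail_cons]
    by_cases ht : ∀ x ∈ t, x = '\\'
    · have hd : d ≠ '\\' := by
        intro h
        exact hAll fun x hx => by
          rcases List.mem_cons.mp hx with h' | h'
          · rw [h']; exact h
          · exact ht x h'
      rw [if_pos ht, if_neg hd, trail_all t ht]
    · rw [if_neg ht]

-- The positional condition over a list (Pre_ reads it on s.toList).
def PreL (l : List Char) : Prop :=
  ∀ j, (hj : j < l.length) → trailBS (l.take j) % 2 = 1 →
    (l[j] = '\\' ∨ l[j] = 't' ∨ l[j] = 'n' ∨ l[j] = '\'')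

lemma preL_cons_ne (c : Char) (rest : List Char) (hc : c ≠ '\\') (h : PreL (c :: rest)) : PreL rest := by
  intro j hj hp
  have := h (j + 1) (by simpa using hj) (by rw [List.take_succ_cons, trail_cons_ne c _ hc]; exact hp)
  simpa using this

lemma preL_esc (d : Char) (rest' : List Char) (h : PreL ('\\' :: d :: rest')) :
    (d = '\\' ∨ d = 't' ∨ d = 'n' ∨ d = '\'') ∧ PreL rest' := by
  constructor
  · have := h 1 (by simp) (by rw [show ('\\' :: d :: rest').take 1 = ['\\'] from rfl]; decide)
    simpa using this
  · intro j hj hp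
    have := h (j + 2) (by simpa using hj)
      (by rw [show ('\\' :: d :: rest').take (j + 2) = '\\' :: d :: rest'.take j from rfl, trail_two]; exact hp)
    simpa using this

-- Structural validity (the shape A's state machine accepts), derived from PreL.
def xmlOk : List Char → Bool
  | [] => true
  | c :: rest =>
    if c ≠ '\\' then xmlOk rest
    else
      match rest with
      | [] => true
      | d :: rest' => (d = '\\' || d = 't' || d = 'n' || d = '\'') && xmlOk rest'

lemma xmlOk_cons_ne (c : Char) (rest : List Char) (hc : c ≠ '\\') : xmlOk (c :: rest) = xmlOk rest := by
  cases rest <;> simp [xmlOk, hc]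

lemma xmlOk_esc (d : Char) (rest' : List Char) :
    xmlOk ('\\' :: d :: rest') = ((d = '\\' || d = 't' || d = 'n' || d = '\'') && xmlOk rest') := by
  simp [xmlOk]

lemma preL_ok (l : List Char) (h : PreL l) : xmlOk l = true := by
  induction l using xmlOk.induct with
  | case1 => rfl
  | case2 c rest hc ih =>
      rw [xmlOk_cons_ne c rest hc]
      exact ih (preL_cons_ne c rest hc h)
  | case3 c hc =>
      have hc' : c = '\\' := not_ne_iff.mp hc
      subst hc'
      rfl
  | case4 c hc d rest' ih =>
      have hc' : c = '\\' := not_ne_iff.mp hc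
      subst hc'
      obtain ⟨hd, hrest⟩ := preL_esc d rest' h
      rw [xmlOk_esc]
      refine Bool.and_eq_true_iff.mpr ⟨by simp only [Bool.or_eq_true, decide_eq_true_eq]; tauto, ih hrest⟩

-- A's escape step: with the flag set, a valid escape char d appends its mapping and clears the flag.
lemma escStepA (acc : List Char) (d m : Char) (hm : xmlEscDict.get? d = some m) :
    xmlStepA (some (acc, true)) d = some (acc ++ [m], false) := by
  by_cases h1 : d = '\\'
  · subst h1
    rw [show xmlEscDict.get? '\\' = some '\\' from by decide] at hm
    cases hm; simp [xmlStepA]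
  · by_cases h2 : d = 't'
    · subst h2
      rw [show xmlEscDict.get? 't' = some '\t' from by decide] at hm
      cases hm; simp [xmlStepA]
    · by_cases h3 : d = 'n'
      · subst h3
        rw [show xmlEscDict.get? 'n' = some '\n' from by decide] at hm
        cases hm; simp [xmlStepA]
      · by_cases h4 : d = '\''
        · subst h4
          rw [show xmlEscDict.get? '\'' = some '\'' from by decide] at hm
          cases hm; simp [xmlStepA]
        · exfalso
          rw [show xmlEscDict
              = PySem.Dict.mk [('\\', '\\'), ('t', '\t'), ('n', '\n'), ('\'', '\'')] from by decide] at hm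
          simp [PySem.Dict.get?, Ne.symm h1, Ne.symm h2, Ne.symm h3, Ne.symm h4] at hm

-- An escape char the dict does not know is not one of the four xmlOk allows.
lemma escNone (d : Char) (hm : xmlEscDict.get? d = none)
    (hd : (d = '\\' || d = 't' || d = 'n' || d = '\'') = true) : False := by
  simp only [Bool.or_eq_true, decide_eq_true_eq] at hd
  rcases hd with ((h | h) | h) | h <;> subst h <;> revert hm <;> decide

-- On valid input, A's fold from (acc, false) succeeds and appends exactly the
-- characters B's lookahead loop produces.
lemma xml_key (l : List Char) : ∀ acc : List Char, xmlOk l = true →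
    ∃ r b, xmlGoB l = some r ∧ l.foldl xmlStepA (some (acc, false)) = some (acc ++ r, b) := by
  induction l using xmlGoB.induct with
  | case1 =>
      intro acc _
      exact ⟨[], false, rfl, by simp⟩
  | case2 c rest hc ih =>
      intro acc hok
      rw [xmlOk_cons_ne c rest hc] at hok
      obtain ⟨r, b, hg, hf⟩ := ih (acc ++ [c]) hok
      refine ⟨c :: r, b, ?_, ?_⟩
      · rw [xmlGoB.eq_def]
        simp [hc, hg]
      · simpa [xmlStepA, hc] using hf
  | case3 c hc =>
      intro acc _
      have hc' : c = '\\' := not_ne_iff.mp hc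
      subst hc'
      exact ⟨[], true, by simp [xmlGoB], by simp [xmlStepA]⟩
  | case4 c hc d rest' m hm ih =>
      intro acc hok
      have hc' : c = '\\' := not_ne_iff.mp hc
      subst hc'
      rw [xmlOk_esc d rest'] at hok
      obtain ⟨r, b, hg, hf⟩ := ih (acc ++ [m]) (Bool.and_eq_true_iff.mp hok).2
      refine ⟨m :: r, b, ?_, ?_⟩
      · rw [xmlGoB.eq_def]
        simp [hm, hg]
      · have h1 : xmlStepA (some (acc, false)) '\\' = some (acc, true) := by simp [xmlStepA]
        rw [List.foldl_cons, List.foldl_cons, h1, escStepA acc d m hm]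
        simpa using hf
  | case5 c hc d rest' hm =>
      intro acc hok
      have hc' : c = '\\' := not_ne_iff.mp hc
      subst hc'
      rw [xmlOk_esc d rest'] at hok
      exact absurd (escNone d hm (Bool.and_eq_true_iff.mp hok).1) not_false

-- ===== VERDICT (by name: the statement is the Claim_ definition above) =====
theorem xml_unescape_spec : Claim_equal_xml_unescape := by
  intro s _ hpre
  unfold Spec_xml_unescape xml_unescape xml_unescape_alt
  obtain ⟨r, b, hg, hf⟩ := xml_key s.toList [] (preL_ok s.toList hpre)
  rw [hg, hf]
  simp
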